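-- pv_equiv track=rewrite | github.com/Frigorifico9/AwesomeEncryption | newConstellationFinder.py | Threading
-- ===== SOURCE A (Python) =====
-- class Vertex: #I needed to access all of thee constants dynamically and this is the best I came up with
--     def __init__(self,symbol):
--         if symbol == 'S':
--             self.symbol = 'S'
--             self.n1 = 2
--             self.n2 = 1
--             self.s1 = 3
--             self.s2 = 2
--         elif symbol == 'L':
--             self.symbol = 'L'
--             self.n1 = 4
--             self.n2 = 0
--             self.s1 = 3
--             self.s2 = 0
--         elif symbol == 'T':
--             self.symbol = 'T'
--             self.n1 = 4
--             self.n2 = 2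
--             self.s1 = 1
--             self.s2 = 0
--
-- def Threading(constellation):
--     [alpha, beta, gamma] = [1, 1, 0]
--     for n in range(1, len(constellation)):
--         prevNode = Vertex(constellation[n - 1])
--         currentNode = Vertex(constellation[n])
--         if n == 1:
--             gamma = prevNode.s1 * gamma + (prevNode.s2-currentNode.n2)
--         else:
--             gamma = prevNode.s1 * gamma + alpha * (prevNode.s2 - currentNode.n2)
--         alpha = currentNode.n1*alpha
--         beta = prevNode.s1 * beta
--     return alpha, -beta, gamma
-- ===== SOURCE B (Python) =====
-- # Constants per symbol: (n1, n2, s1, s2).  Unknown symbols raise (KeyError),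
-- # like A's Vertex raises AttributeError; such inputs are outside Pre_.
-- _TABLE = {'S': (2, 1, 3, 2), 'L': (4, 0, 3, 0), 'T': (4, 2, 1, 0)}
--
-- def Threading(constellation):
--     cs = list(constellation)
--     # prefix-product table: A[m] = product of n1 over cs[1..m]
--     A = [1]
--     for ch in cs[1:]:
--         A.append(A[-1] * _TABLE[ch][0])
--     alpha = A[len(cs) - 1] if cs else 1
--     # single back-to-front pass: suf is the running suffix product of s1,
--     # gamma the unrolled linear recurrence as an explicit sum
--     gamma, suf = 0, 1
--     for n in range(len(cs) - 1, 0, -1):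
--         gamma += suf * A[n - 1] * (_TABLE[cs[n - 1]][3] - _TABLE[cs[n]][1])
--         suf *= _TABLE[cs[n - 1]][2]
--     return alpha, -suf, gamma
-- ===== Notes on version B (the rewrite author's own statement) =====
-- stated objective: alternative
-- what changed: Replaces A's fused forward linear recurrence over (alpha,beta,gamma) by a prefix-product table of n1 (giving alpha by lookup) plus one back-to-front pass that accumulates gamma as the unrolled sum with a running suffix product of s1 (which is beta).
import Mathlib
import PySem

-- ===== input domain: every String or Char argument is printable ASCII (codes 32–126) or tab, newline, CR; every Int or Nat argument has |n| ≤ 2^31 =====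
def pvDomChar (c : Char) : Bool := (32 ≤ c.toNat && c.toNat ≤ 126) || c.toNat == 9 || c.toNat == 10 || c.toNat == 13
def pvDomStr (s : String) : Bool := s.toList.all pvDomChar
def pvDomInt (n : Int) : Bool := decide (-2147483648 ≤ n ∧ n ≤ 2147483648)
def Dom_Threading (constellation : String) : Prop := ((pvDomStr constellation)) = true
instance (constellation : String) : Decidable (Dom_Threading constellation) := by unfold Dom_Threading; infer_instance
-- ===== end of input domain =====

-- B replaces A's fused forward recurrence by a prefix-product table of n1 plus one
-- back-to-front suffix-product pass over s1 (objective: alternative algorithm, same cost).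


-- ===== PORT A =====
-- Vertex attributes as four functions; for symbols other than S/L/T the Python Vertex
-- gets no such attributes and A raises AttributeError — those inputs are excluded by
-- Pre_ below, so the default 0 of these helpers is never reached inside Pre_.
def vN1 : Char → Int | 'S' => 2 | 'L' => 4 | 'T' => 4 | _ => 0
def vN2 : Char → Int | 'S' => 1 | 'L' => 0 | 'T' => 2 | _ => 0
def vS1 : Char → Int | 'S' => 3 | 'L' => 3 | 'T' => 1 | _ => 0
def vS2 : Char → Int | 'S' => 2 | 'L' => 0 | 'T' => 0 | _ => 0

-- loop body of A's 'for n in range(1, len(constellation))'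
def stepA (cs : List Char) (st : Int × Int × Int) (n : Int) : Int × Int × Int :=
  let prev := PySem.List.pyGetD cs (n - 1) ' '
  let cur := PySem.List.pyGetD cs n ' '
  let gamma := if n == 1 then vS1 prev * st.2.2 + (vS2 prev - vN2 cur)
               else vS1 prev * st.2.2 + st.1 * (vS2 prev - vN2 cur)
  (vN1 cur * st.1, vS1 prev * st.2.1, gamma)

def Threading (constellation : String) : Int × Int × Int :=
  let cs := constellation.toList
  let st := (PySem.List.pyRange 1 (cs.length : Int)).foldl (stepA cs) (1, 1, 0)
  (st.1, -st.2.1, st.2.2)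

-- ===== PORT B =====
-- _TABLE[ch] = (n1, n2, s1, s2); the default is never reached inside Pre_
-- (Python B raises KeyError there, exactly where A raises AttributeError).
def cTup : Char → Int × Int × Int × Int
  | 'S' => (2, 1, 3, 2) | 'L' => (4, 0, 3, 0) | 'T' => (4, 2, 1, 0) | _ => (0, 0, 0, 0)

-- B's prefix-product table: A = [1]; for ch in cs[1:]: A.append(A[-1] * _TABLE[ch][0])
def buildA (l : List Char) : List Int :=
  l.foldl (fun acc ch => acc ++ [PySem.List.pyGetD acc (-1) 0 * (cTup ch).1]) [1]

-- loop body of B's 'for n in range(len(cs) - 1, 0, -1)'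
def stepB (cs : List Char) (tab : List Int) (st : Int × Int) (n : Int) : Int × Int :=
  (st.1 + st.2 * PySem.List.pyGetD tab (n - 1) 0 *
      ((cTup (PySem.List.pyGetD cs (n - 1) ' ')).2.2.2 - (cTup (PySem.List.pyGetD cs n ' ')).2.1),
   st.2 * (cTup (PySem.List.pyGetD cs (n - 1) ' ')).2.2.1)

def Threading_alt (constellation : String) : Int × Int × Int :=
  let cs := constellation.toList
  let tab := buildA (cs.drop 1)
  let alpha := if cs ≠ [] then PySem.List.pyGetD tab ((cs.length : Int) - 1) 0 else 1
  let p := (PySem.List.pyRange ((cs.length : Int) - 1) 0 (-1)).foldl (stepB cs tab) (0, 1)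
  (alpha, -p.2, p.1)

-- ===== PRECONDITION & SPEC =====
-- Pre_ excludes exactly the inputs where Python A raises (AttributeError): strings of
-- length >= 2 containing a symbol other than 'S', 'L', 'T'.  (Python B raises KeyError there.)
def Pre_Threading (constellation : String) : Prop :=
  constellation.toList.length ≤ 1 ∨
    constellation.toList.all (fun c => c == 'S' || c == 'L' || c == 'T') = true
instance (constellation : String) : Decidable (Pre_Threading constellation) := by
  unfold Pre_Threading; infer_instance

def pvWitness_Threading : String := "SLT"

def Spec_Threading (constellation : String) (out : Int × Int × Int) : Prop := out = Threading_alt constellation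
instance (constellation : String) (out : Int × Int × Int) : Decidable (Spec_Threading constellation out) := by unfold Spec_Threading; infer_instance

-- ===== CLAIM (what is proved, stated in full; the proofs are below) =====
def Claim_equal_Threading : Prop := ∀ (constellation : String), Dom_Threading constellation → Pre_Threading constellation → Spec_Threading constellation (Threading constellation)

-- ===== LEMMAS AND PROOFS =====

-- products of the per-character constants: Pn over n1 (alpha), Ps over s1 (beta)
def Pn (l : List Char) : Int := (l.map vN1).prod

def Ps (l : List Char) : Int := (l.map vS1).prod

theorem cTup_eq1 (c : Char) : (cTup c).1 = vN1 c := by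
  unfold cTup vN1; split <;> rfl

theorem cTup_eq2 (c : Char) : (cTup c).2.1 = vN2 c := by unfold cTup vN2; split <;> rfl

theorem cTup_eq31 (c : Char) : (cTup c).2.2.1 = vS1 c := by unfold cTup vS1; split <;> rfl

theorem cTup_eq32 (c : Char) : (cTup c).2.2.2 = vS2 c := by unfold cTup vS2; split <;> rfl

theorem pyGetD_append_left' {α : Type} (xs ys : List α) (i : Int) (d : α)
    (h0 : 0 ≤ i) (h1 : i < (xs.length : Int)) :
    PySem.List.pyGetD (xs ++ ys) i d = PySem.List.pyGetD xs i d := by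
  rw [PySem.List.pyGetD_eq_getElem _ d h0 (by simp; omega),
      PySem.List.pyGetD_eq_getElem _ d h0 h1,
      List.getElem_append_left (by omega)]

theorem buildA_eq (l : List Char) :
    buildA l = (List.range (l.length + 1)).map (fun i => Pn (l.take i)) := by
  induction l using List.reverseRecOn with
  | nil => simp [buildA, Pn]
  | append_singleton l c ih =>
      have hsnoc : buildA (l ++ [c]) =
          buildA l ++ [PySem.List.pyGetD (buildA l) (-1) 0 * (cTup c).1] := by
        simp [buildA, List.foldl_append]
      rw [hsnoc, ih]
      have hlast : PySem.List.pyGetD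
          (List.map (fun i => Pn (List.take i l)) (List.range (l.length + 1))) (-1) 0 = Pn l := by
        rw [PySem.List.pyGetD_neg_ofNat _ 1 0 (by omega) (by simp)]
        simp
      rw [hlast]
      rw [show (l ++ [c]).length + 1 = (l.length + 1) + 1 by simp]
      conv_rhs => rw [List.range_succ, List.map_append]
      congr 1
      · apply List.map_congr_left
        intro i hi
        simp at hi
        rw [List.take_append_of_le_length (by omega)]
      · simp [Pn, cTup_eq1]

theorem buildA_snoc (l : List Char) (c : Char) :
    buildA (l ++ [c]) = buildA l ++ [PySem.List.pyGetD (buildA l) (-1) 0 * (cTup c).1] := by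
  simp [buildA, List.foldl_append]

theorem buildA_length (l : List Char) : (buildA l).length = l.length + 1 := by
  rw [buildA_eq]; simp

theorem buildA_get (l : List Char) (i : Int) (h0 : 0 ≤ i) (h1 : i ≤ (l.length : Int)) :
    PySem.List.pyGetD (buildA l) i 0 = Pn (l.take i.toNat) := by
  rw [buildA_eq, PySem.List.pyGetD_eq_getElem _ _ h0 (by simp; omega)]
  simp

theorem stepA_congr_append (l : List Char) (c : Char) (acc : Int × Int × Int) (n : Int)
    (h1 : 1 ≤ n) (h2 : n < (l.length : Int)) :
    stepA (l ++ [c]) acc n = stepA l acc n := by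
  unfold stepA
  rw [pyGetD_append_left' l [c] (n - 1) ' ' (by omega) (by omega),
      pyGetD_append_left' l [c] n ' ' (by omega) h2]

theorem stepB_congr_append (l : List Char) (c : Char) (tab0 : List Int) (x : Int)
    (acc : Int × Int) (n : Int) (h1 : 1 ≤ n) (h2 : n < (l.length : Int))
    (h3 : n ≤ (tab0.length : Int)) :
    stepB (l ++ [c]) (tab0 ++ [x]) acc n = stepB l tab0 acc n := by
  unfold stepB
  rw [pyGetD_append_left' tab0 [x] (n - 1) 0 (by omega) (by omega),
      pyGetD_append_left' l [c] (n - 1) ' ' (by omega) (by omega),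
      pyGetD_append_left' l [c] n ' ' (by omega) h2]

theorem stepB_affine (cs : List Char) (tab : List Int) (l : List Int) (st : Int × Int) :
    l.foldl (stepB cs tab) st
      = (st.1 + st.2 * (l.foldl (stepB cs tab) (0, 1)).1,
         st.2 * (l.foldl (stepB cs tab) (0, 1)).2) := by
  induction l generalizing st with
  | nil => simp
  | cons a l ih =>
      rw [List.foldl_cons, List.foldl_cons, ih (stepB cs tab st a), ih (stepB cs tab (0, 1) a)]
      simp only [stepB, Prod.mk.injEq]
      constructor <;> ring

theorem main_inv (cs : List Char) :
    (((PySem.List.pyRange 1 (cs.length : Int)).foldl (stepA cs) (1, 1, 0)).1 = Pn (cs.drop 1)) ∧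
    (((PySem.List.pyRange 1 (cs.length : Int)).foldl (stepA cs) (1, 1, 0)).2.1 = Ps cs.dropLast) ∧
    (((PySem.List.pyRange ((cs.length : Int) - 1) 0 (-1)).foldl
        (stepB cs (buildA (cs.drop 1))) (0, 1)).2 = Ps cs.dropLast) ∧
    (((PySem.List.pyRange 1 (cs.length : Int)).foldl (stepA cs) (1, 1, 0)).2.2 =
      ((PySem.List.pyRange ((cs.length : Int) - 1) 0 (-1)).foldl
        (stepB cs (buildA (cs.drop 1))) (0, 1)).1) := by
  induction cs using List.reverseRecOn with
  | nil =>
      rw [PySem.List.pyRange_one_eq_nil (by norm_num),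
          PySem.List.pyRange_neg_one_eq_nil (by norm_num)]
      simp [Pn, Ps]
  | append_singleton l c ih =>
      rcases List.eq_nil_or_concat l with rfl | ⟨t, p, rfl⟩
      · rw [show (((([] : List Char) ++ [c]).length : Int)) = 1 from by simp,
            PySem.List.pyRange_one_eq_nil (by norm_num),
            PySem.List.pyRange_neg_one_eq_nil (by norm_num)]
        simp [Pn, Ps]
      · -- cs = t ++ [p] ++ [c]
        simp only [List.concat_eq_append] at ih ⊢
        simp only [List.length_append, List.length_cons, List.length_nil] at ih ⊢
        push_cast at ih ⊢
        rw [show ((t.length : Int) + 1 - 1) = (t.length : Int) from by ring] at ih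
        have hdropLast1 : (t ++ [p]).dropLast = t := by simp
        rw [hdropLast1] at ih
        obtain ⟨ihA, ihB1, ihB2, ihG⟩ := ih
        have hdrop : (t ++ [p] ++ [c]).drop 1 = (t ++ [p]).drop 1 ++ [c] :=
          List.drop_append_of_le_length (by simp)
        have hdropLast : (t ++ [p] ++ [c]).dropLast = t ++ [p] := by simp
        rw [show ((t.length : Int) + 1 + 1 - 1) = (t.length : Int) + 1 from by ring,
            hdrop, hdropLast, buildA_snoc]
        -- evaluate the two new character accesses and the new table access
        have hprev : PySem.List.pyGetD (t ++ [p] ++ [c]) ((t.length : Int) + 1 - 1) ' ' = p := by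
          rw [show ((t.length : Int) + 1 - 1) = ((t.length : Nat) : Int) from by ring,
              PySem.List.pyGetD_natCast]
          rw [List.getD_append _ _ _ _ (by simp)]
          simp [List.getD]
        have hcur : PySem.List.pyGetD (t ++ [p] ++ [c]) ((t.length : Int) + 1) ' ' = c := by
          rw [show ((t.length : Int) + 1) = (((t.length + 1 : Nat)) : Int) from by push_cast; ring,
              PySem.List.pyGetD_natCast]
          simp [List.getD]
        have htab : PySem.List.pyGetD
            (buildA ((t ++ [p]).drop 1) ++
              [PySem.List.pyGetD (buildA ((t ++ [p]).drop 1)) (-1) 0 * (cTup c).1])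
            ((t.length : Int) + 1 - 1) 0 = Pn ((t ++ [p]).drop 1) := by
          have hlb := buildA_length ((t ++ [p]).drop 1)
          simp only [List.length_drop, List.length_append, List.length_cons,
            List.length_nil] at hlb
          rw [show ((t.length : Int) + 1 - 1) = (t.length : Int) from by ring,
              pyGetD_append_left' _ _ _ _ (by positivity) (by omega),
              buildA_get _ _ (by positivity)
                (by simp only [List.length_drop, List.length_append, List.length_cons,
                      List.length_nil]
                    push_cast; omega)]
          rw [show ((t.length : Int)).toNat = ((t ++ [p]).drop 1).length from
                by simp only [List.length_drop, List.length_append, List.length_cons,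
                     List.length_nil]
                   omega,
              List.take_length]
        -- A side as one equation: peel the last index, shrink the list in the remaining fold
        have hA : List.foldl (stepA (t ++ [p] ++ [c])) (1, 1, 0)
              (PySem.List.pyRange 1 ((t.length : Int) + 1 + 1))
            = stepA (t ++ [p] ++ [c])
                (List.foldl (stepA (t ++ [p])) (1, 1, 0)
                  (PySem.List.pyRange 1 ((t.length : Int) + 1)))
                ((t.length : Int) + 1) := by
          rw [PySem.List.pyRange_one_succ_right (by omega : (1 : Int) ≤ (t.length : Int) + 1),
              List.foldl_append,
              PySem.List.foldl_congr_mem (PySem.List.pyRange 1 ((t.length : Int) + 1))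
                (stepA (t ++ [p] ++ [c])) (stepA (t ++ [p])) (1, 1, 0)
                (fun acc x hx => by
                  have h := PySem.List.mem_pyRange_one.mp hx
                  exact stepA_congr_append (t ++ [p]) c acc x h.1
                    (by simp only [List.length_append, List.length_cons, List.length_nil]
                        omega))]
          simp only [List.foldl_cons, List.foldl_nil]
        -- B side as one equation: peel the first (= largest) countdown index, then affinity
        have hB : List.foldl
              (stepB (t ++ [p] ++ [c])
                (buildA ((t ++ [p]).drop 1) ++
                  [PySem.List.pyGetD (buildA ((t ++ [p]).drop 1)) (-1) 0 * (cTup c).1]))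
              (0, 1) (PySem.List.pyRange ((t.length : Int) + 1) 0 (-1))
            = (Pn ((t ++ [p]).drop 1) * (vS2 p - vN2 c) +
                 vS1 p * (List.foldl (stepB (t ++ [p]) (buildA (List.drop 1 (t ++ [p])))) (0, 1)
                   (PySem.List.pyRange (↑t.length) 0 (-1))).1,
               vS1 p * (List.foldl (stepB (t ++ [p]) (buildA (List.drop 1 (t ++ [p])))) (0, 1)
                   (PySem.List.pyRange (↑t.length) 0 (-1))).2) := by
          rw [PySem.List.pyRange_neg_one_cons (by omega : (0 : Int) < (t.length : Int) + 1),
              List.foldl_cons,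
              show ((t.length : Int) + 1 - 1) = (t.length : Int) from by ring,
              PySem.List.foldl_congr_mem (PySem.List.pyRange (↑t.length) 0 (-1))
                (stepB (t ++ [p] ++ [c])
                  (buildA ((t ++ [p]).drop 1) ++
                    [PySem.List.pyGetD (buildA ((t ++ [p]).drop 1)) (-1) 0 * (cTup c).1]))
                (stepB (t ++ [p]) (buildA (List.drop 1 (t ++ [p])))) _
                (fun acc x hx => by
                  have h := PySem.List.mem_pyRange_neg_one.mp hx
                  have hlb := buildA_length ((t ++ [p]).drop 1)
                  simp only [List.length_drop, List.length_append, List.length_cons,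
                    List.length_nil] at hlb
                  exact stepB_congr_append (t ++ [p]) c _ _ acc x (by omega)
                    (by simp only [List.length_append, List.length_cons, List.length_nil]
                        omega)
                    (by omega)),
              stepB_affine]
          simp only [stepB, hprev, hcur, htab, cTup_eq2, cTup_eq31, cTup_eq32, Prod.mk.injEq]
          constructor <;> ring
        rw [hA, hB]
        refine ⟨?_, ?_, ?_, ?_⟩
        · simp only [stepA, hcur, ihA, Pn, List.map_append, List.prod_append,
            List.map_cons, List.map_nil, List.prod_cons, List.prod_nil]
          ring
        · simp only [stepA, hprev, ihB1, Ps, List.map_append, List.prod_append,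
            List.map_cons, List.map_nil, List.prod_cons, List.prod_nil]
          ring
        · simp only [ihB2, Ps, List.map_append, List.prod_append,
            List.map_cons, List.map_nil, List.prod_cons, List.prod_nil]
          ring
        · simp only [stepA, hprev, hcur]
          by_cases hone : ((t.length : Int) + 1 = 1)
          · have ht : t = [] := List.length_eq_zero_iff.mp (by omega)
            subst ht
            have hP1 : Pn ((([] : List Char) ++ [p]).drop 1) = 1 := by simp [Pn]
            rw [hP1] at ihA ⊢
            simp only [hone, beq_self_eq_true, if_true]
            rw [PySem.List.pyRange_one_eq_nil (by omega : (1 : Int) ≤ 1),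
                show ((List.length ([] : List Char) : Int)) = 0 from by simp,
                PySem.List.pyRange_neg_one_eq_nil (by omega)]
            simp
          · have hfalse : (((t.length : Int) + 1) == 1) = false := by
              simp [hone]
            rw [hfalse]
            simp only [Bool.false_eq_true, if_false, ihA, ihG]
            ring

-- B's alpha lookup equals the full prefix product
theorem alpha_eq (cs : List Char) :
    (if cs ≠ [] then PySem.List.pyGetD (buildA (cs.drop 1)) ((cs.length : Int) - 1) 0 else 1)
      = Pn (cs.drop 1) := by
  by_cases h : cs = []
  · subst h; simp [Pn]
  · have hlen : 1 ≤ cs.length := List.length_pos_iff.mpr h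
    simp only [h, ne_eq, not_false_eq_true, if_true]
    rw [buildA_get _ _ (by omega) (by simp only [List.length_drop]; omega)]
    rw [show ((cs.length : Int) - 1).toNat = (cs.drop 1).length from
          by simp only [List.length_drop]; omega,
        List.take_length]

-- ===== VERDICT (by name: the statement is the Claim_ definition above) =====
theorem Threading_spec : Claim_equal_Threading := by
  unfold Claim_equal_Threading
  intro s _ _
  unfold Spec_Threading
  simp only [Threading, Threading_alt]
  obtain ⟨hA, hB1, hB2, hG⟩ := main_inv s.toList
  rw [hA, hB1, hB2, hG, alpha_eq]
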